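-- pv_equiv track=rewrite | github.com/catherine-00/lgu6p | lab01/bioinfo/bioinfo.final.이민진.201911071.py | calc_restrict_fragment_size_v3
-- ===== SOURCE A (Python) =====
-- def calc_restrict_fragment_size_v3(dna, enz):
--     # +++your code here+++
--     delet=enz.replace("*","")
--     all=dna.replace(delet,enz)
--     frag=all.split("*")
--     size=[]
--     i=0
--     multi=1
--     for i in range(len(frag)):
--         size.append(len(frag[i]))
--         multi = multi * size[i]
--     return multi
--
--     pass
-- ===== SOURCE B (Python) =====
-- def calc_restrict_fragment_size_v3(dna, enz):
--     delet = enz.replace("*", "")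
--     all_ = dna.replace(delet, enz)
--     multi = 1
--     counter = 0
--     for c in all_:
--         if c == '*':
--             multi *= counter
--             counter = 0
--         else:
--             counter += 1
--     return multi * counter
-- ===== Notes on version B (the rewrite author's own statement) =====
-- stated objective: alternative
-- what changed: Replaces the split-into-fragments list plus index loop (appending lengths to a list and indexing it) by a single character scan that threads a running product and a fragment-length counter, never materialising the fragment list.
import Mathlib
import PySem

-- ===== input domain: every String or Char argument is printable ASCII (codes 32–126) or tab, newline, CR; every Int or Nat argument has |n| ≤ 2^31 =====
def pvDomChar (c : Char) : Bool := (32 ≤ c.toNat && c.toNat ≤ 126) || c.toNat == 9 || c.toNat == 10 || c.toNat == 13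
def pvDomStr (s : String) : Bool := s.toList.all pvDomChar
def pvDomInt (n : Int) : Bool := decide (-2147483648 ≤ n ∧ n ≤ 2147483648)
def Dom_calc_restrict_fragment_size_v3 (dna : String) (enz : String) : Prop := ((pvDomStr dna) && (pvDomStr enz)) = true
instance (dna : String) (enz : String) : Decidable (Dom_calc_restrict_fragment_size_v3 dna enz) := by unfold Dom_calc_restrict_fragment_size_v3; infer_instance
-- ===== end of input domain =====

-- B replaces A's split-into-fragment-list + index loop by a single character scan threading a running product and a length counter (alternative decomposition, same cost).


-- ===== PORT A =====
def calc_restrict_fragment_size_v3 (dna : String) (enz : String) : Int :=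
  let delet := PySem.Str.replace enz "*" ""
  let all := PySem.Str.replace dna delet enz
  let frag := PySem.Chars.splitOn all.toList ['*']
  -- for i in range(len(frag)): size.append(len(frag[i])); multi = multi * size[i]
  let res := (PySem.List.pyRange 0 (frag.length : Int) 1).foldl
      (fun (st : List Int × Int) i =>
        let sz := st.1 ++ [((PySem.List.pyGetD frag i []).length : Int)]
        (sz, st.2 * PySem.List.pyGetD sz i 0))
      ([], 1)
  res.2

-- ===== PORT B =====
-- one step of B's character scan: on '*' fold the counter into the product, else count the character
def pvScan (p : Int × Int) (c : Char) : Int × Int :=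
  if c = '*' then (p.1 * p.2, 0) else (p.1, p.2 + 1)

def calc_restrict_fragment_size_v3_alt (dna : String) (enz : String) : Int :=
  let delet := PySem.Str.replace enz "*" ""
  let all := PySem.Str.replace dna delet enz
  let p := all.toList.foldl pvScan (1, 0)
  p.1 * p.2

-- ===== PRECONDITION & SPEC =====
def Spec_calc_restrict_fragment_size_v3 (dna : String) (enz : String) (out : Int) : Prop := out = calc_restrict_fragment_size_v3_alt dna enz
instance (dna : String) (enz : String) (out : Int) : Decidable (Spec_calc_restrict_fragment_size_v3 dna enz out) := by unfold Spec_calc_restrict_fragment_size_v3; infer_instance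

-- ===== CLAIM (what is proved, stated in full; the proofs are below) =====
def Claim_equal_calc_restrict_fragment_size_v3 : Prop := ∀ (dna : String) (enz : String), Dom_calc_restrict_fragment_size_v3 dna enz → Spec_calc_restrict_fragment_size_v3 dna enz (calc_restrict_fragment_size_v3 dna enz)

-- ===== LEMMAS AND PROOFS =====

-- product of fragment lengths
def pvProd (l : List (List Char)) : Int := (l.map (fun f => (f.length : Int))).prod

theorem pvScan_homog (l : List Char) (m k : Int) :
    (l.foldl pvScan (m, k)).1 * (l.foldl pvScan (m, k)).2
      = m * ((l.foldl pvScan (1, k)).1 * (l.foldl pvScan (1, k)).2) := by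
  induction l generalizing m k with
  | nil => simp
  | cons c rest ih =>
    simp only [List.foldl_cons, pvScan]
    by_cases h : c = '*'
    · simp only [h, reduceIte]
      rw [ih (m * k) 0, ih (1 * k) 0]; ring
    · simp only [if_neg h]
      exact ih m (k + 1)

theorem pv_go_spec (fuel : Nat) (l cur : List Char) (acc : List (List Char))
    (h : l.length ≤ fuel) :
    pvProd (PySem.Chars.splitOn.go ['*'] fuel l cur acc)
      = (acc.map (fun f => (f.length : Int))).prod
          * ((l.foldl pvScan (1, (cur.length : Int))).1 * (l.foldl pvScan (1, (cur.length : Int))).2) := by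
  induction fuel generalizing l cur acc with
  | zero =>
    have hl : l = [] := List.eq_nil_of_length_eq_zero (Nat.le_zero.mp h)
    subst hl
    simp only [PySem.Chars.splitOn.go, pvProd, List.map_reverse, List.prod_reverse,
      List.append_nil, List.map_cons, List.prod_cons, List.length_reverse, List.foldl_nil]
    ring
  | succ fuel ih =>
    cases l with
    | nil =>
      simp only [PySem.Chars.splitOn.go, pvProd, List.map_reverse, List.prod_reverse,
        List.map_cons, List.prod_cons, List.length_reverse, List.foldl_nil]
      ring
    | cons c rest =>
      simp only [PySem.Chars.splitOn.go]
      by_cases hc : c = '*'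
      · subst hc
        have hpre : ['*'].isPrefixOf ('*' :: rest) = true := by
          simp [List.isPrefixOf]
        rw [if_pos hpre]
        simp only [List.length_singleton, List.drop_one, List.tail_cons]
        rw [ih rest [] ((cur.reverse) :: acc) (by simpa using h)]
        simp only [List.foldl_cons, pvScan, reduceIte, List.map_cons, List.prod_cons,
          List.length_reverse, List.length_nil, Nat.cast_zero]
        rw [pvScan_homog rest (1 * (cur.length : Int)) 0]
        ring
      · have hpre : ['*'].isPrefixOf (c :: rest) = false := by
          simp only [List.isPrefixOf, Bool.and_eq_false_iff]
          left
          simpa using fun hh => hc hh.symm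
        rw [if_neg (by simp [hpre])]
        rw [ih rest (c :: cur) acc (by simpa using Nat.lt_succ_iff.mp (by simpa using h))]
        simp only [List.foldl_cons, pvScan, if_neg hc, List.length_cons, Nat.cast_add,
          Nat.cast_one]

theorem pv_split_eq_scan (cs : List Char) :
    pvProd (PySem.Chars.splitOn cs ['*'])
      = (cs.foldl pvScan (1, 0)).1 * (cs.foldl pvScan (1, 0)).2 := by
  unfold PySem.Chars.splitOn
  rw [pv_go_spec (cs.length + 1) cs [] [] (Nat.le_succ _)]
  simp

theorem pv_aloop_spec (frag : List (List Char)) :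
    ∀ (n : Nat) (k : Nat) (sz : List Int) (m : Int), frag.length - k = n → sz.length = k → k ≤ frag.length →
    ((PySem.List.pyRange (k : Int) (frag.length : Int) 1).foldl
      (fun (st : List Int × Int) i =>
        (st.1 ++ [((PySem.List.pyGetD frag i []).length : Int)],
          st.2 * PySem.List.pyGetD (st.1 ++ [((PySem.List.pyGetD frag i []).length : Int)]) i 0))
      (sz, m)).2
      = m * pvProd (frag.drop k) := by
  intro n
  induction n with
  | zero =>
    intro k sz m hn hsz hk
    have hkeq : k = frag.length := by omega
    subst hkeq
    rw [PySem.List.pyRange_one_eq_nil (le_refl _)]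
    simp [pvProd]
  | succ n ih =>
    intro k sz m hn hsz hk
    have hklt : k < frag.length := by omega
    rw [PySem.List.pyRange_one_cons (by exact_mod_cast hklt)]
    simp only [List.foldl_cons]
    have hget : PySem.List.pyGetD frag (k : Int) ([] : List Char) = frag[k] := by
      rw [PySem.List.pyGetD_natCast]
      exact List.getD_eq_getElem _ _ hklt
    have hget2 : PySem.List.pyGetD (sz ++ [((frag[k]).length : Int)]) (k : Int) 0
        = ((frag[k]).length : Int) := by
      rw [PySem.List.pyGetD_natCast]
      rw [List.getD_eq_getElem _ _ (by simp [hsz])]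
      simp [← hsz]
    simp only [hget, hget2]
    have hcast : ((k : Int) + 1) = ((k + 1 : Nat) : Int) := by push_cast; ring
    rw [hcast, ih (k + 1) (sz ++ [((frag[k]).length : Int)]) (m * (frag[k]).length)
      (by omega) (by simp [hsz]) (by omega)]
    rw [List.drop_eq_getElem_cons hklt]
    simp only [pvProd, List.map_cons, List.prod_cons]
    ring

-- ===== VERDICT (by name: the statement is the Claim_ definition above) =====
theorem calc_restrict_fragment_size_v3_spec : Claim_equal_calc_restrict_fragment_size_v3 := by
  intro dna enz _
  unfold Spec_calc_restrict_fragment_size_v3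
  unfold calc_restrict_fragment_size_v3 calc_restrict_fragment_size_v3_alt
  simp only []
  have h := pv_aloop_spec
    (PySem.Chars.splitOn (PySem.Str.replace dna (PySem.Str.replace enz "*" "") enz).toList ['*'])
    (PySem.Chars.splitOn (PySem.Str.replace dna (PySem.Str.replace enz "*" "") enz).toList ['*']).length
    0 [] 1 (by omega) rfl (Nat.zero_le _)
  simp only [Nat.cast_zero, List.drop_zero, one_mul] at h
  rw [h]
  exact pv_split_eq_scan _
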